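-- pv_equiv track=rewrite | github.com/tamu-edu/dor-hprc-HPCMosaic | views/api.py | parse_scontrol_output
-- ===== SOURCE A (Python) =====
-- def parse_scontrol_output(output):
--     """Parses output from `scontrol show job <jobid>` to extract job details."""
--     job_info = {}
--
--     # Flatten all lines into space-separated tokens
--     tokens = []
--     for line in output.split("\n"):
--         line = line.strip()
--         if line:
--             tokens.extend(line.split())
--
--     # Map scontrol keys to our desired dictionary keys
--     key_map = {
--         "JobId": "job_id",
--         "JobName": "job_name",
--         "UserId": "user_group",
--         "Account": "user_account",
--         "JobState": "state",
--         "Reason": "reason",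
--         "ExitCode": "exit_code",
--         "RunTime": "time_elapsed",
--         "TimeLimit": "time_requested",
--         "StartTime": "start_time",
--         "EndTime": "end_time",
--         "Partition": "partition",
--         "NodeList": "nodelist",
--         "NumNodes": "node_count",
--         "NumCPUs": "cores",
--         "NumTasks": "task_count",
--         "Command": "submit_line",
--         "WorkDir": "submit_dir",
--     }
--
--     for token in tokens:
--         if "=" in token:
--             key, value = token.split("=", 1)
--             if key in key_map:
--                 job_info[key_map[key]] = value
--
--     return {"job_details": job_info}
-- ===== SOURCE B (Python) =====
-- import re
--
-- # scontrol key -> output dict key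
-- KEY_MAP = {
--     "JobId": "job_id",
--     "JobName": "job_name",
--     "UserId": "user_group",
--     "Account": "user_account",
--     "JobState": "state",
--     "Reason": "reason",
--     "ExitCode": "exit_code",
--     "RunTime": "time_elapsed",
--     "TimeLimit": "time_requested",
--     "StartTime": "start_time",
--     "EndTime": "end_time",
--     "Partition": "partition",
--     "NodeList": "nodelist",
--     "NumNodes": "node_count",
--     "NumCPUs": "cores",
--     "NumTasks": "task_count",
--     "Command": "submit_line",
--     "WorkDir": "submit_dir",
-- }
--
-- _PAIR = re.compile(r'(\S+?)=(\S*)')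
--
-- def parse_scontrol_output(output):
--     """Parses output from `scontrol show job <jobid>` to extract job details."""
--     job_info = {}
--     for key, value in _PAIR.findall(output):
--         mapped = KEY_MAP.get(key)
--         if mapped is not None:
--             job_info[mapped] = value
--     return {"job_details": job_info}
-- ===== Notes on version B (the rewrite author's own statement) =====
-- stated objective: idiomatic
-- what changed: Replaces A's two-phase line loop (split('\n'), strip, per-line split(), then split('=',1) on each token) with a single compiled-regex pass re.findall(r'(\S+?)=(\S*)', output) that emits key/value pairs directly.
import Mathlib
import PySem

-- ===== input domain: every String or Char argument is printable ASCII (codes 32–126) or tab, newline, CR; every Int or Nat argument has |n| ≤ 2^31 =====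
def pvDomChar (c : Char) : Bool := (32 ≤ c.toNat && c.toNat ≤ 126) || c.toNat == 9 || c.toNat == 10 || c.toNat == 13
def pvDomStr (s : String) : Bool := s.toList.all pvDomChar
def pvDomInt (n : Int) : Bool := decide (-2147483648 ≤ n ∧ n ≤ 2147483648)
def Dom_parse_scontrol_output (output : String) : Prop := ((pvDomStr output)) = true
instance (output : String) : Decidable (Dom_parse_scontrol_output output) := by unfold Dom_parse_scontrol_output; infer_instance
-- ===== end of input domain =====

-- B replaces A's line-by-line strip/tokenize/split('=',1) loop with one regex pass
-- (re.findall(r'(\S+?)=(\S*)', output)); objective: idiomatic. Equivalence is proved for all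
-- inputs in the ASCII domain above.

-- ===== PORT A =====
-- key_map dict literal (shared by both Pythons)
def pvKeyMap : PySem.Dict String String := PySem.Dict.mk
  [("JobId", "job_id"), ("JobName", "job_name"), ("UserId", "user_group"),
   ("Account", "user_account"), ("JobState", "state"), ("Reason", "reason"),
   ("ExitCode", "exit_code"), ("RunTime", "time_elapsed"), ("TimeLimit", "time_requested"),
   ("StartTime", "start_time"), ("EndTime", "end_time"), ("Partition", "partition"),
   ("NodeList", "nodelist"), ("NumNodes", "node_count"), ("NumCPUs", "cores"),
   ("NumTasks", "task_count"), ("Command", "submit_line"), ("WorkDir", "submit_dir")]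

def parse_scontrol_output (output : String) : List (String × List (String × String)) :=
  -- tokens = []; for line in output.split("\n"): line = line.strip(); if line: tokens.extend(line.split())
  let lines : List String := match PySem.Str.split? output "\n" with
    | some ls => ls
    | none => []   -- unreachable: the separator "\n" is not empty
  let tokens : List String := lines.foldl (fun acc line =>
    let line := PySem.Str.strip line
    if line ≠ "" then acc ++ PySem.Str.split₀ line else acc) []
  -- for token in tokens: if "=" in token: key, value = token.split("=", 1); if key in key_map: ...
  let job_info : PySem.Dict String String := tokens.foldl (fun d token =>
    if PySem.Str.isIn "=" token then
      match PySem.Str.splitMax? token "=" 1 with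
      | some [key, value] =>
        match pvKeyMap.get? key with
        | some mapped => d.insert mapped value
        | none => d
      | _ => d          -- unreachable: "=" in token gives exactly two parts
    else d) PySem.Dict.empty
  [("job_details", job_info.items)]

-- ===== PORT B =====
-- Hand port of the regex engine for the fixed pattern r'(\S+?)=(\S*)' (re.findall, leftmost,
-- non-overlapping).  \S is ported as ¬ PySem.Chars.isspace, which is exact on the task's
-- ASCII domain (codes 32–126, tab, newline, CR).
-- pvMatchHere acc cs: one match attempt with the lazy group (\S+?) currently holding acc;
-- consume one more \S char, then try the literal '=', then the greedy (\S*), else extend the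
-- lazy group — exactly the backtracking order of the regex.
def pvMatchHere (acc : List Char) : List Char → Option (List Char × List Char × List Char)
  | [] => none
  | c :: rest =>
    if PySem.Chars.isspace c then none
    else if rest.head? = some '=' then
      let v := rest.tail.takeWhile (fun d => !PySem.Chars.isspace d)
      some (acc ++ [c], v, rest.tail.drop v.length)
    else pvMatchHere (acc ++ [c]) rest

-- (termination fact for pvFindAll: a successful match consumes at least two characters)
theorem pvMatchHere_rest_lt (acc cs : List Char) (k v rest' : List Char)
    (h : pvMatchHere acc cs = some (k, v, rest')) : rest'.length < cs.length := by
  induction cs generalizing acc with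
  | nil => simp [pvMatchHere] at h
  | cons c rest ih =>
    rw [pvMatchHere] at h
    split at h
    · exact absurd h (by simp)
    · split at h
      · simp only [Option.some.injEq, Prod.mk.injEq] at h
        obtain ⟨-, -, h3⟩ := h
        subst h3
        have h1 : rest.tail.length ≤ rest.length := by cases rest <;> simp
        have h2 : (rest.tail.drop ((rest.tail.takeWhile (fun d => !PySem.Chars.isspace d)).length)).length = rest.tail.length - (rest.tail.takeWhile (fun d => !PySem.Chars.isspace d)).length := List.length_drop
        simp only [List.length_cons]
        omega
      · exact Nat.lt_trans (ih _ h) (by simp)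

-- re.findall: scan left to right; on a match emit the two groups and resume after the match,
-- otherwise advance one position.
def pvFindAll : List Char → List (List Char × List Char)
  | [] => []
  | c :: rest =>
    match h : pvMatchHere [] (c :: rest) with
    | some (k, v, rest') => (k, v) :: pvFindAll rest'
    | none => pvFindAll rest
termination_by cs => cs.length
decreasing_by
  · exact pvMatchHere_rest_lt _ _ _ _ _ h
  · simp

def parse_scontrol_output_alt (output : String) : List (String × List (String × String)) :=
  let job_info : PySem.Dict String String := (pvFindAll output.toList).foldl (fun d kv =>
    match pvKeyMap.get? (String.ofList kv.1) with
    | some mapped => d.insert mapped (String.ofList kv.2)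
    | none => d) PySem.Dict.empty
  [("job_details", job_info.items)]

-- ===== PRECONDITION & SPEC =====
def Spec_parse_scontrol_output (output : String) (out : List (String × List (String × String))) : Prop := out = parse_scontrol_output_alt output
instance (output : String) (out : List (String × List (String × String))) : Decidable (Spec_parse_scontrol_output output out) := by unfold Spec_parse_scontrol_output; infer_instance

-- ===== CLAIM (what is proved, stated in full; the proofs are below) =====
def Claim_equal_parse_scontrol_output : Prop := ∀ (output : String), Dom_parse_scontrol_output output → Spec_parse_scontrol_output output (parse_scontrol_output output)

-- ===== LEMMAS AND PROOFS =====

-- canonical whitespace tokenizer (reference form of str.split())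
def pvTok : List Char → List (List Char)
  | [] => []
  | c :: cs =>
    if PySem.Chars.isspace c then pvTok cs
    else (c :: cs.takeWhile (fun d => !PySem.Chars.isspace d)) ::
         pvTok (cs.dropWhile (fun d => !PySem.Chars.isspace d))
termination_by cs => cs.length
decreasing_by
  · simp
  · exact Nat.lt_succ_of_le (List.length_dropWhile_le _ _)

-- reference form of str.split("\n")
def pvLinesAux (cur : List Char) : List Char → List (List Char)
  | [] => [cur]
  | c :: cs => if c = '\n' then cur :: pvLinesAux [] cs else pvLinesAux (cur ++ [c]) cs

-- reference form of str.split("=", 1)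
def pvSplit1 (cur : List Char) : List Char → List (List Char)
  | [] => [cur]
  | c :: cs => if c = '=' then [cur, cs] else pvSplit1 (cur ++ [c]) cs

theorem split₀_go_spec (cs cur acc) :
    PySem.Chars.split₀.go cs cur acc = acc.reverse ++
      (if cur.isEmpty then pvTok cs
       else (cur.reverse ++ cs.takeWhile (fun d => !PySem.Chars.isspace d)) ::
            pvTok (cs.dropWhile (fun d => !PySem.Chars.isspace d))) := by
  induction cs generalizing cur acc with
  | nil =>
    rw [PySem.Chars.split₀.go]
    cases cur <;> simp [pvTok]
  | cons c rest ih =>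
    rw [PySem.Chars.split₀.go]
    by_cases hc : PySem.Chars.isspace c = true
    · rw [if_pos hc]
      rw [show pvTok (c :: rest) = pvTok rest from by rw [pvTok, if_pos hc]] at *
      cases cur with
      | nil => simpa using ih [] acc
      | cons x xs =>
        simp only [List.isEmpty_cons, List.takeWhile_cons, List.dropWhile_cons, hc]
        simpa [pvTok, hc] using ih [] ((x::xs).reverse :: acc)
    · rw [if_neg hc]
      rw [ih (c :: cur) acc]
      cases cur with
      | nil => simp [pvTok, hc, List.takeWhile_cons, List.dropWhile_cons]
      | cons x xs => simp [hc, List.takeWhile_cons, List.dropWhile_cons]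

theorem split₀_eq_tok (cs : List Char) : PySem.Chars.split₀ cs = pvTok cs := by
  simpa using split₀_go_spec cs [] []

theorem go_nl (fuel : Nat) : ∀ (cs cur : List Char) (acc : List (List Char)), cs.length ≤ fuel →
    PySem.Chars.splitOn.go ['\n'] fuel cs cur acc = acc.reverse ++ pvLinesAux cur.reverse cs := by
  induction fuel with
  | zero =>
    intro cs cur acc h
    have : cs = [] := by cases cs <;> simp_all
    subst this
    simp [PySem.Chars.splitOn.go, pvLinesAux]
  | succ fuel ih =>
    intro cs cur acc h
    cases cs with
    | nil => simp [PySem.Chars.splitOn.go, pvLinesAux]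
    | cons c rest =>
      rw [PySem.Chars.splitOn.go]
      by_cases hc : c = '\n'
      · subst hc
        have hpre : List.isPrefixOf ['\n'] ('\n' :: rest) = true := by simp [List.isPrefixOf]
        rw [if_pos hpre]
        have hd : List.drop ['\n'].length ('\n' :: rest) = rest := by simp
        rw [hd, ih rest [] (cur.reverse :: acc) (by simpa using Nat.le_of_succ_le_succ h), pvLinesAux]
        simp
      · have hpre : List.isPrefixOf ['\n'] (c :: rest) = false := by
          simp only [List.isPrefixOf, Bool.and_true, beq_eq_false_iff_ne, ne_eq]
          exact fun h => hc h.symm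
        rw [if_neg (by simp [hpre])]
        rw [ih rest (c :: cur) acc (by simpa using Nat.le_of_succ_le_succ h), pvLinesAux]
        simp [hc]

theorem splitOn_newline (cs : List Char) : PySem.Chars.splitOn cs ['\n'] = pvLinesAux [] cs := by
  rw [PySem.Chars.splitOn]
  simpa using go_nl (cs.length + 1) cs [] [] (by omega)

theorem tok_spaces {sp : List Char} (h : ∀ c ∈ sp, PySem.Chars.isspace c = true) : pvTok sp = [] := by
  induction sp with
  | nil => simp [pvTok]
  | cons c cs ih =>
    rw [pvTok, if_pos (h c (by simp))]
    exact ih (fun d hd => h d (by simp [hd]))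

theorem tok_append_space {s : Char} (hs : PySem.Chars.isspace s = true) (a b : List Char) :
    pvTok (a ++ s :: b) = pvTok a ++ pvTok b := by
  induction ha : a.length using Nat.strong_induction_on generalizing a with
  | _ n ih =>
  subst ha
  cases a with
  | nil => simp [pvTok, hs]
  | cons c a' =>
    by_cases hc : PySem.Chars.isspace c = true
    · rw [List.cons_append, pvTok, if_pos hc, pvTok, if_pos hc]
      exact ih a'.length (by simp) a' rfl
    · rw [List.cons_append, pvTok, if_neg hc, pvTok, if_neg hc]
      by_cases hall : ∀ x ∈ a', (!PySem.Chars.isspace x) = true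
      · have hta : List.takeWhile (fun d => !PySem.Chars.isspace d) a' = a' :=
          List.takeWhile_eq_self_iff.mpr hall
        have hda : List.dropWhile (fun d => !PySem.Chars.isspace d) a' = [] :=
          List.dropWhile_eq_nil_iff.mpr hall
        have h1 : List.takeWhile (fun d => !PySem.Chars.isspace d) (a' ++ s :: b) = a' := by
          rw [List.takeWhile_append, if_pos (by rw [hta])]
          rw [List.takeWhile_cons_of_neg (by simp [hs])]
          simp
        have h2 : List.dropWhile (fun d => !PySem.Chars.isspace d) (a' ++ s :: b) = s :: b := by
          rw [List.dropWhile_append, if_pos (by simp [hda])]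
          exact List.dropWhile_cons_of_neg (by simp [hs])
        rw [h1, h2, show pvTok (s :: b) = pvTok b from by rw [pvTok, if_pos hs]]
        simp [pvTok, hta, hda]
      · have hta : ¬ ((List.takeWhile (fun d => !PySem.Chars.isspace d) a').length = a'.length) := by
          intro hlen
          exact hall (List.takeWhile_eq_self_iff.mp
            ((List.takeWhile_prefix _).eq_of_length hlen))
        have hda : ¬ ((List.dropWhile (fun d => !PySem.Chars.isspace d) a').isEmpty = true) := by
          intro hemp
          exact hall (List.dropWhile_eq_nil_iff.mp (by simpa using hemp))
        rw [List.takeWhile_append, List.dropWhile_append, if_neg hta, if_neg (by simpa using hda)]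
        rw [ih (List.dropWhile (fun d => !PySem.Chars.isspace d) a').length
            (Nat.lt_succ_of_le (List.length_dropWhile_le _ _)) _ rfl]
        simp

theorem tok_append_spaces {sp : List Char} (h : ∀ c ∈ sp, PySem.Chars.isspace c = true) (m : List Char) :
    pvTok (m ++ sp) = pvTok m := by
  cases sp with
  | nil => simp
  | cons s sp' =>
    have h1 : PySem.Chars.isspace s = true := h s (by simp)
    have h2 : ∀ c ∈ sp', PySem.Chars.isspace c = true := fun c hc => h c (by simp [hc])
    rw [tok_append_space h1 m sp', tok_spaces h2]
    simp

theorem tok_strip (l : List Char) : pvTok (PySem.Chars.strip l) = pvTok l := by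
  rw [PySem.Chars.strip]
  have h1 : pvTok (PySem.Chars.lstrip l) = pvTok l := by
    rw [PySem.Chars.lstrip]
    induction l with
    | nil => rfl
    | cons c cs ih =>
      by_cases hc : PySem.Chars.isspace c = true
      · rw [List.dropWhile_cons_of_pos hc, ih, pvTok, if_pos hc]
      · rw [List.dropWhile_cons_of_neg hc]
  rw [← h1]
  generalize PySem.Chars.lstrip l = m
  rw [PySem.Chars.rstrip]
  have hsplit : m = (List.dropWhile PySem.Chars.isspace m.reverse).reverse ++
      (List.takeWhile PySem.Chars.isspace m.reverse).reverse := by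
    rw [← List.reverse_append, List.takeWhile_append_dropWhile]
    simp
  calc pvTok ((List.dropWhile PySem.Chars.isspace m.reverse).reverse)
      = pvTok ((List.dropWhile PySem.Chars.isspace m.reverse).reverse ++
          (List.takeWhile PySem.Chars.isspace m.reverse).reverse) := by
        rw [tok_append_spaces]
        intro c hc
        rw [List.mem_reverse] at hc
        exact List.mem_takeWhile_imp hc
    _ = pvTok m := by rw [← hsplit]

theorem tok_linesAux (cs : List Char) : ∀ cur,
    (pvLinesAux cur cs).flatMap pvTok = pvTok (cur ++ cs) := by
  induction cs with
  | nil => intro cur; simp [pvLinesAux]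
  | cons c rest ih =>
    intro cur
    rw [pvLinesAux]
    by_cases hc : c = '\n'
    · subst hc
      rw [if_pos rfl]
      simp only [List.flatMap_cons]
      rw [ih []]
      simpa using (tok_append_space (s := '\n') (by decide) cur rest).symm
    · rw [if_neg hc, ih (cur ++ [c])]
      simp

theorem splitOnMax_go_zero (fuel : Nat) (l : List Char) (acc : List (List Char)) :
    PySem.Chars.splitOnMax.go ['='] fuel 0 l [] acc = (l :: acc).reverse := by
  cases fuel with
  | zero => rw [PySem.Chars.splitOnMax.go]; simp
  | succ fuel =>
    cases l with
    | nil => (rw [PySem.Chars.splitOnMax.go]; simp) <;> omega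
    | cons c rest => rw [PySem.Chars.splitOnMax.go]; simp

theorem splitOnMax_go_one (fuel : Nat) : ∀ (w cur : List Char) (acc : List (List Char)), w.length ≤ fuel →
    PySem.Chars.splitOnMax.go ['='] fuel 1 w cur acc = acc.reverse ++ pvSplit1 cur.reverse w := by
  induction fuel with
  | zero =>
    intro w cur acc h
    have : w = [] := by cases w <;> simp_all
    subst this
    rw [PySem.Chars.splitOnMax.go, pvSplit1]
    simp
  | succ fuel ih =>
    intro w cur acc h
    cases w with
    | nil => (rw [PySem.Chars.splitOnMax.go, pvSplit1]; simp) <;> omega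
    | cons c rest =>
      rw [PySem.Chars.splitOnMax.go]
      by_cases hc : c = '='
      · subst hc
        have hpre : List.isPrefixOf ['='] ('=' :: rest) = true := by simp [List.isPrefixOf]
        rw [if_neg (by omega), if_pos hpre]
        have hd : List.drop ['='].length ('=' :: rest) = rest := by simp
        rw [hd]
        rw [show (1 : Nat) - 1 = 0 from rfl, splitOnMax_go_zero]
        rw [pvSplit1, if_pos rfl]
        simp
      · have hpre : List.isPrefixOf ['='] (c :: rest) = false := by
          simp only [List.isPrefixOf, Bool.and_true, beq_eq_false_iff_ne, ne_eq]
          exact fun h => hc h.symm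
        rw [if_neg (by omega), if_neg (by simp [hpre])]
        rw [ih rest (c :: cur) acc (by simpa using Nat.le_of_succ_le_succ h), pvSplit1, if_neg hc]
        simp

theorem splitOnMax_eq (w : List Char) : PySem.Chars.splitOnMax w ['='] 1 = pvSplit1 [] w := by
  rw [PySem.Chars.splitOnMax]
  rw [if_neg (by omega)]
  simpa using splitOnMax_go_one (w.length + 1) w [] [] (by omega)

theorem matchHere_none_acc {cs : List Char} : ∀ {acc acc' : List Char},
    pvMatchHere acc cs = none → pvMatchHere acc' cs = none := by
  induction cs with
  | nil => intro acc acc' _; rfl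
  | cons c rest ih =>
    intro acc acc' h
    rw [pvMatchHere] at h ⊢
    split at h
    · rw [if_pos ‹_›]
    · rw [if_neg ‹_›]
      split at h
      · exact absurd h (by simp)
      · rw [if_neg ‹_›]
        exact ih h


theorem head?_eq_cons {l : List Char} {a : Char} (h : l.head? = some a) : ∃ t, l = a :: t := by
  cases l with
  | nil => simp at h
  | cons x xs => simp at h; exact ⟨xs, by rw [h]⟩

theorem matchHere_append {w rest0 : List Char}
    (hw : ∀ c ∈ w, PySem.Chars.isspace c = false)
    (hr : ∀ r, rest0.head? = some r → PySem.Chars.isspace r = true) :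
    ∀ acc, pvMatchHere acc (w ++ rest0) =
      match pvMatchHere acc w with
      | some (k, v, _) => some (k, v, rest0)
      | none => none := by
  induction w with
  | nil =>
    intro acc
    simp only [List.nil_append, pvMatchHere]
    cases h0 : rest0 with
    | nil => rfl
    | cons r rs =>
      rw [pvMatchHere, if_pos (hr r (by rw [h0]; rfl))]
  | cons c w' ih =>
    intro acc
    have hc : PySem.Chars.isspace c = false := hw c (by simp)
    cases w' with
    | nil =>
      cases h0 : rest0 with
      | nil => simp [pvMatchHere, hc]
      | cons r rs =>
        have hrs : PySem.Chars.isspace r = true := hr r (by rw [h0]; rfl)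
        have hrne : ¬ (r = '=') := by intro h; subst h; exact absurd hrs (by decide)
        subst h0
        simp [pvMatchHere, hc, hrs, hrne]
    | cons e w'' =>
      by_cases he : e = '='
      · subst he
        have hw'' : ∀ x ∈ w'', (fun d => !PySem.Chars.isspace d) x = true := fun x hx => by
          simp [hw x (by simp [hx])]
        have htw : List.takeWhile (fun d => !PySem.Chars.isspace d) (w'' ++ rest0) = w'' := by
          cases h0 : rest0 with
          | nil => simpa using List.takeWhile_eq_self_iff.mpr hw''
          | cons r rs =>
            rw [List.takeWhile_append]
            rw [if_pos (by rw [List.takeWhile_eq_self_iff.mpr hw''])]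
            rw [List.takeWhile_cons_of_neg (by simp [hr r (by rw [h0]; rfl)])]
            simp [List.takeWhile_eq_self_iff.mpr hw'']
        simp [pvMatchHere, hc, htw, List.takeWhile_eq_self_iff.mpr hw'', List.drop_left]
      · rw [List.cons_append, pvMatchHere, if_neg (by simp [hc]), if_neg (by simp [he])]
        conv_rhs => rw [pvMatchHere, if_neg (by simp [hc]), if_neg (by simp [he])]
        exact ih (fun x hx => hw x (by simp [hx])) (acc ++ [c])

theorem matchHere_no_eq {cs : List Char} (h : '=' ∉ cs) : ∀ acc, pvMatchHere acc cs = none := by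
  induction cs with
  | nil => intro acc; rfl
  | cons c rest ih =>
    intro acc
    rw [pvMatchHere]
    split
    · rfl
    · rw [if_neg ?_]
      · exact ih (fun hm => h (List.mem_cons_of_mem _ hm)) _
      · intro hh
        obtain ⟨t, ht⟩ := head?_eq_cons hh
        exact h (by rw [ht]; simp)

theorem matchHere_some_prefix {cs : List Char} : ∀ {acc k v r : List Char},
    pvMatchHere acc cs = some (k, v, r) → acc <+: k := by
  induction cs with
  | nil => intro acc k v r h; simp [pvMatchHere] at h
  | cons c rest ih =>
    intro acc k v r h
    rw [pvMatchHere] at h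
    split at h
    · simp at h
    · split at h
      · simp only [Option.some.injEq, Prod.mk.injEq] at h
        exact h.1 ▸ ⟨[c], rfl⟩
      · exact ((List.prefix_append acc [c]).trans (ih h))

theorem findAll_cons_none {c : Char} {rest : List Char}
    (h : pvMatchHere [] (c :: rest) = none) : pvFindAll (c :: rest) = pvFindAll rest := by
  rw [pvFindAll]
  split
  · rename_i k v r hm
    rw [h] at hm; exact absurd hm (by simp)
  · rfl

theorem findAll_cons_some {c : Char} {rest k v r : List Char}
    (h : pvMatchHere [] (c :: rest) = some (k, v, r)) :
    pvFindAll (c :: rest) = (k, v) :: pvFindAll r := by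
  rw [pvFindAll]
  split
  · rename_i k' v' r' hm
    rw [h] at hm
    simp only [Option.some.injEq, Prod.mk.injEq] at hm
    rw [hm.1, hm.2.1, hm.2.2]
  · rename_i hm
    rw [h] at hm; exact absurd hm (by simp)

theorem findAll_skip {rest0 : List Char}
    (hr : ∀ r, rest0.head? = some r → PySem.Chars.isspace r = true) :
    ∀ {t : List Char}, (∀ c ∈ t, PySem.Chars.isspace c = false) →
    pvMatchHere [] t = none →
    pvFindAll (t ++ rest0) = pvFindAll rest0 := by
  intro t
  induction t with
  | nil => intro _ _; rfl
  | cons d t' ih =>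
    intro ht hm
    have hd : PySem.Chars.isspace d = false := ht d (by simp)
    have hm' : pvMatchHere [] t' = none := by
      rw [pvMatchHere, if_neg (by simp [hd])] at hm
      split at hm
      · exact absurd hm (by simp)
      · exact matchHere_none_acc hm
    have hall : pvMatchHere [] (d :: (t' ++ rest0)) = none := by
      have h2 := matchHere_append (w := d :: t') (rest0 := rest0) ht hr []
      rw [List.cons_append] at h2
      rw [h2, hm]
    rw [List.cons_append, findAll_cons_none hall]
    exact ih (fun c hc => ht c (by simp [hc])) hm'

theorem dropWhile_head_space (cs : List Char) :
    ∀ r, (List.dropWhile (fun d => !PySem.Chars.isspace d) cs).head? = some r →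
      PySem.Chars.isspace r = true := by
  induction cs with
  | nil => intro r h; simp at h
  | cons c rest ih =>
    intro r h
    by_cases hc : PySem.Chars.isspace c = true
    · rw [List.dropWhile_cons_of_neg (by simp [hc])] at h
      simp at h
      rw [← h]; exact hc
    · rw [List.dropWhile_cons_of_pos (by simp [hc])] at h
      exact ih r h

def pvPairs (w : List Char) : List (List Char × List Char) :=
  match pvMatchHere [] w with
  | some (k, v, _) => [(k, v)]
  | none => []

theorem findAll_eq_flatMap (cs : List Char) :
    pvFindAll cs = (pvTok cs).flatMap pvPairs := by
  induction hn : cs.length using Nat.strong_induction_on generalizing cs with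
  | _ n ihn =>
  subst hn
  cases cs with
  | nil => simp [pvFindAll, pvTok]
  | cons c rest =>
    by_cases hc : PySem.Chars.isspace c = true
    · rw [findAll_cons_none (by rw [pvMatchHere, if_pos hc]),
          pvTok, if_pos hc]
      exact ihn rest.length (by simp) rest rfl
    · rw [pvTok, if_neg hc]
      set P : Char → Bool := fun d => !PySem.Chars.isspace d with hP
      have hw : ∀ x ∈ c :: rest.takeWhile P, PySem.Chars.isspace x = false := by
        intro x hx
        rcases List.mem_cons.mp hx with h | h
        · rw [h]; simpa using hc
        · have h2 := List.mem_takeWhile_imp h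
          rw [hP] at h2; simpa using h2
      have hsplit : c :: rest = (c :: rest.takeWhile P) ++ rest.dropWhile P := by
        simp [List.takeWhile_append_dropWhile]
      have hr := dropWhile_head_space rest
      cases hmm : pvMatchHere [] (c :: rest.takeWhile P) with
      | some kvr =>
        obtain ⟨k, v, r⟩ := kvr
        have hfull : pvMatchHere [] ((c :: rest.takeWhile P) ++ rest.dropWhile P) =
            some (k, v, rest.dropWhile P) := by
          rw [matchHere_append hw hr [], hmm]
        rw [List.cons_append] at hfull
        conv_lhs => rw [hsplit, List.cons_append]
        rw [findAll_cons_some hfull]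
        rw [List.flatMap_cons]
        rw [show pvPairs (c :: rest.takeWhile P) = [(k, v)] from by unfold pvPairs; rw [hmm]]
        have := ihn (rest.dropWhile P).length
          (Nat.lt_succ_of_le (List.length_dropWhile_le _ _)) (rest.dropWhile P) rfl
        rw [this]
        rfl
      | none =>
        conv_lhs => rw [hsplit]
        rw [findAll_skip hr hw hmm]
        rw [List.flatMap_cons, show pvPairs (c :: rest.takeWhile P) = [] from by unfold pvPairs; rw [hmm]]
        have := ihn (rest.dropWhile P).length
          (Nat.lt_succ_of_le (List.length_dropWhile_le _ _)) (rest.dropWhile P) rfl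
        rw [this]
        rfl

theorem tok_props (cs : List Char) :
    ∀ w ∈ pvTok cs, w ≠ [] ∧ ∀ c ∈ w, PySem.Chars.isspace c = false := by
  induction hn : cs.length using Nat.strong_induction_on generalizing cs with
  | _ n ihn =>
  subst hn
  cases cs with
  | nil => simp [pvTok]
  | cons c rest =>
    by_cases hc : PySem.Chars.isspace c = true
    · rw [pvTok, if_pos hc]
      exact ihn rest.length (by simp) rest rfl
    · rw [pvTok, if_neg hc]
      intro w hw
      rcases List.mem_cons.mp hw with h | h
      · subst h
        refine ⟨by simp, ?_⟩
        intro x hx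
        rcases List.mem_cons.mp hx with h | h
        · rw [h]; simpa using hc
        · simpa using List.mem_takeWhile_imp h
      · exact ihn (List.dropWhile (fun d => !PySem.Chars.isspace d) rest).length
          (Nat.lt_succ_of_le (List.length_dropWhile_le _ _)) _ rfl w h

theorem keymap_none {k : List Char} (h : '=' ∈ k ∨ k = []) :
    pvKeyMap.get? (String.ofList k) = none := by
  rw [PySem.Dict.get?]
  rw [List.find?_eq_none.mpr]
  · rfl
  · intro p hp
    simp only [pvKeyMap] at hp
    fin_cases hp <;>
      (simp only [beq_eq_false_iff_ne, ne_eq]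
       intro he
       have := congrArg String.toList (eq_of_beq he)
       simp only [String.toList_ofList] at this
       rcases h with h | h
       · rw [← this] at h; revert h; decide
       · rw [h] at this; revert this; decide)

theorem rel_split1 : ∀ (t : List Char) (acc : List Char),
    (∀ c ∈ t, PySem.Chars.isspace c = false) →
    t.head? ≠ some '=' →
    (match pvMatchHere acc t with
     | some (k, v, _) => pvSplit1 acc t = [k, v]
     | none => pvSplit1 acc t = [acc ++ t] ∧ '=' ∉ t) := by
  intro t
  induction t with
  | nil => intro acc _ _; simp [pvMatchHere, pvSplit1]
  | cons e t' ih =>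
    intro acc ht hh
    have he : ¬ (e = '=') := by simpa using hh
    have hes : PySem.Chars.isspace e = false := ht e (by simp)
    rw [pvMatchHere, if_neg (by simp [hes])]
    rw [show pvSplit1 acc (e :: t') = pvSplit1 (acc ++ [e]) t' from by rw [pvSplit1, if_neg he]]
    cases ht' : t' with
    | nil =>
      simp only [List.head?_nil, pvMatchHere, pvSplit1]
      refine ⟨by simp, ?_⟩
      simp only [List.mem_cons, List.not_mem_nil, or_false]
      exact fun hx => he hx.symm
    | cons f t'' =>
      by_cases hf : f = '='
      · subst hf
        rw [if_pos (show ('=' :: t'').head? = some '=' from rfl)]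
        simp only [List.tail_cons]
        have ht'' : List.takeWhile (fun d => !PySem.Chars.isspace d) t'' = t'' := by
          rw [List.takeWhile_eq_self_iff]
          intro x hx
          simp [ht x (by rw [ht']; simp [hx])]
        rw [ht'']
        rw [show pvSplit1 (acc ++ [e]) ('=' :: t'') = [acc ++ [e], t''] from by rw [pvSplit1, if_pos rfl]]
      · rw [if_neg (by simp [hf])]
        have := ih (acc ++ [e]) (fun c hc => ht c (List.mem_cons_of_mem _ hc)) (by rw [ht']; simp [hf])
        rw [ht'] at this
        cases hm : pvMatchHere (acc ++ [e]) (f :: t'') with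
        | some kvr =>
          rw [hm] at this
          obtain ⟨k, v, r⟩ := kvr
          exact this
        | none =>
          rw [hm] at this
          refine ⟨by rw [this.1]; simp, ?_⟩
          intro hmem
          rcases List.mem_cons.mp hmem with h | h
          · exact he h.symm
          · exact this.2 h

theorem mem_singleton_infix {a : Char} {l : List Char} (h : a ∈ l) : [a] <:+: l := by
  obtain ⟨s, t, rfl⟩ := List.append_of_mem h
  exact ⟨s, t, by simp⟩

theorem isIn_eq_mem (w : List Char) :
    PySem.Str.isIn "=" (String.ofList w) = decide ('=' ∈ w) := by
  rw [PySem.Str.isIn]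
  rw [show (String.ofList w).toList = w from String.toList_ofList]
  by_cases h : '=' ∈ w
  · simp only [h, decide_true]
    exact (PySem.Chars.isIn_iff_infix _ _).mpr (mem_singleton_infix h)
  · simp only [h, decide_false]
    rw [PySem.Chars.isIn_eq_false_iff]
    intro hinf
    exact h (hinf.sublist.subset (by simp))

theorem splitMax?_ofList (w : List Char) :
    PySem.Str.splitMax? (String.ofList w) "=" 1 = some ((pvSplit1 [] w).map String.ofList) := by
  rw [PySem.Str.splitMax?, PySem.Chars.splitMax?]
  rw [show (String.ofList w).toList = w from String.toList_ofList]
  rw [show ("=" : String).toList = ['='] from rfl, if_neg (by simp), splitOnMax_eq]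
  rfl

-- A's per-token step, on the character level
def pvStepA (d : PySem.Dict String String) (w : List Char) : PySem.Dict String String :=
  if PySem.Str.isIn "=" (String.ofList w) then
    match PySem.Str.splitMax? (String.ofList w) "=" 1 with
    | some [key, value] =>
      match pvKeyMap.get? key with
      | some mapped => d.insert mapped value
      | none => d
    | _ => d
  else d

-- B's per-pair step
def pvStepB (d : PySem.Dict String String) (kv : List Char × List Char) : PySem.Dict String String :=
  match pvKeyMap.get? (String.ofList kv.1) with
  | some mapped => d.insert mapped (String.ofList kv.2)
  | none => d

theorem step_token (d : PySem.Dict String String) (w : List Char)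
    (hne : w ≠ []) (hw : ∀ c ∈ w, PySem.Chars.isspace c = false) :
    pvStepA d w = (pvPairs w).foldl pvStepB d := by
  cases w with
  | nil => exact absurd rfl hne
  | cons c t =>
    rw [pvStepA, isIn_eq_mem]
    by_cases hmem : '=' ∈ c :: t
    · rw [if_pos (by simp [hmem])]
      rw [splitMax?_ofList]
      by_cases hc : c = '='
      · -- token starts with '=': A's key is "", B's key (if any) contains '='; both skip
        subst hc
        rw [show pvSplit1 [] ('=' :: t) = [[], t] from by rw [pvSplit1, if_pos rfl]]
        simp only [List.map_cons, List.map_nil]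
        rw [show pvKeyMap.get? (String.ofList []) = none from keymap_none (Or.inr rfl)]
        rw [pvPairs]
        cases hm : pvMatchHere [] ('=' :: t) with
        | none => simp
        | some kvr =>
          obtain ⟨k, v, r⟩ := kvr
          have hk : '=' ∈ k := by
            rw [pvMatchHere, if_neg (by decide)] at hm
            split at hm
            · simp only [Option.some.injEq, Prod.mk.injEq] at hm
              rw [← hm.1]; simp
            · have := matchHere_some_prefix hm
              rcases this with ⟨s, hs⟩
              rw [← hs]; simp
          simp only [List.foldl_cons, List.foldl_nil]
          rw [pvStepB, keymap_none (Or.inl hk)]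
      · -- token starts with a non-'=' char
        rw [show pvSplit1 [] (c :: t) = pvSplit1 [c] t from by rw [pvSplit1, if_neg hc]; simp]
        rw [pvPairs]
        cases t with
        | nil => simp at hmem; exact absurd hmem.symm hc
        | cons f t' =>
          by_cases hf : f = '='
          · subst hf
            rw [show pvSplit1 [c] ('=' :: t') = [[c], t'] from by rw [pvSplit1, if_pos rfl]]
            have htw : List.takeWhile (fun d => !PySem.Chars.isspace d) t' = t' := by
              rw [List.takeWhile_eq_self_iff]
              intro x hx
              simp [hw x (by simp [hx])]
            rw [show pvMatchHere [] (c :: '=' :: t') =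
                some ([c], t', List.drop t'.length t') from by
              rw [pvMatchHere, if_neg (by simp [hw c (by simp)])]
              rw [if_pos (show ('=' :: t').head? = some '=' from rfl)]
              simp [htw]]
            simp [pvStepB]
          · have hrel := rel_split1 (f :: t') [c]
              (fun x hx => hw x (List.mem_cons_of_mem _ hx)) (by simp [hf])
            rw [show pvMatchHere [] (c :: f :: t') = pvMatchHere [c] (f :: t') from by
              rw [pvMatchHere, if_neg (by simp [hw c (by simp)]), if_neg (by simp [hf])]
              simp]
            cases hm : pvMatchHere [c] (f :: t') with
            | none =>
              rw [hm] at hrel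
              exfalso
              rcases List.mem_cons.mp hmem with h | h
              · exact hc h.symm
              · exact hrel.2 h
            | some kvr =>
              obtain ⟨k, v, r⟩ := kvr
              rw [hm] at hrel
              rw [hrel]
              simp [pvStepB]
    · rw [if_neg (by simp [hmem])]
      rw [pvPairs, matchHere_no_eq hmem []]
      rfl

theorem tokens_eq (cs : List Char) :
    ((pvLinesAux [] cs).map String.ofList).foldl (fun acc line =>
      let line := PySem.Str.strip line
      if line ≠ "" then acc ++ PySem.Str.split₀ line else acc) [] =
    (pvTok cs).map String.ofList := by
  rw [List.foldl_map]
  have hfun : (fun (acc : List String) (lc : List Char) =>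
      let line := PySem.Str.strip (String.ofList lc)
      if line ≠ "" then acc ++ PySem.Str.split₀ line else acc) =
      (fun acc lc => acc ++ (pvTok lc).map String.ofList) := by
    funext acc lc
    have htl : (PySem.Str.strip (String.ofList lc)).toList = PySem.Chars.strip lc := by
      rw [PySem.Str.toList_strip, String.toList_ofList]
    by_cases h : PySem.Chars.strip lc = []
    · have hempty : PySem.Str.strip (String.ofList lc) = "" := by
        apply String.ext
        rw [htl, h]
        rfl
      simp only [hempty, ne_eq, not_true_eq_false, if_false]
      rw [show pvTok lc = [] from by rw [← tok_strip lc, h]; simp [pvTok]]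
      simp
    · have hne : PySem.Str.strip (String.ofList lc) ≠ "" := by
        intro hx
        apply h
        rw [← htl, hx]; rfl
      simp only [ne_eq, hne, not_false_eq_true, if_true]
      rw [PySem.Str.split₀]
      rw [show (PySem.Str.strip (String.ofList lc)).toList = PySem.Chars.strip lc from htl]
      rw [split₀_eq_tok, tok_strip]
  rw [hfun]
  rw [PySem.List.foldl_append_eq_flatMap (fun lc => (pvTok lc).map String.ofList) _ []]
  rw [List.nil_append]
  rw [← List.map_flatMap]
  rw [tok_linesAux cs []]
  rfl

theorem fold_tokens : ∀ (ws : List (List Char)) (d : PySem.Dict String String),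
    (∀ w ∈ ws, w ≠ [] ∧ ∀ c ∈ w, PySem.Chars.isspace c = false) →
    ws.foldl pvStepA d = (ws.flatMap pvPairs).foldl pvStepB d := by
  intro ws
  induction ws with
  | nil => intro d _; rfl
  | cons w ws ih =>
    intro d h
    rw [List.foldl_cons, List.flatMap_cons, List.foldl_append]
    rw [← step_token d w (h w (by simp)).1 (h w (by simp)).2]
    exact ih _ (fun x hx => h x (by simp [hx]))

-- ===== VERDICT (by name: the statement is the Claim_ definition above) =====
theorem main_eq (output : String) :
    parse_scontrol_output output = parse_scontrol_output_alt output := by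
  rw [parse_scontrol_output, parse_scontrol_output_alt]
  have hsplit : PySem.Str.split? output "\n" =
      some ((pvLinesAux [] output.toList).map String.ofList) := by
    rw [PySem.Str.split?, PySem.Chars.split?]
    rw [show ("\n" : String).toList = ['\n'] from rfl]
    rw [if_neg (by simp), splitOn_newline]
    rfl
  simp only [hsplit]
  rw [tokens_eq output.toList]
  rw [List.foldl_map]
  rw [show (List.foldl (fun (d : PySem.Dict String String) (w : List Char) =>
      if PySem.Str.isIn "=" (String.ofList w) = true then
        match PySem.Str.splitMax? (String.ofList w) "=" 1 with
        | some [key, value] =>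
          (match pvKeyMap.get? key with
           | some mapped => d.insert mapped value
           | none => d)
        | _ => d
      else d) PySem.Dict.empty (pvTok output.toList)) =
      List.foldl pvStepA PySem.Dict.empty (pvTok output.toList) from rfl]
  rw [fold_tokens (pvTok output.toList) PySem.Dict.empty (tok_props output.toList)]
  rw [← findAll_eq_flatMap]
  rfl

theorem parse_scontrol_output_spec : Claim_equal_parse_scontrol_output := by
  intro output _
  unfold Spec_parse_scontrol_output
  exact main_eq output
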